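-- pv_equiv track=rewrite | github.com/qhovnpl/Identyfikacja-r-nic-w-strukturze-2D-RNA-dla-sekwencji-identycznych-i-podobnych | Zad1_Bioinformatyka.py | metrykaGory
-- ===== SOURCE A (Python) =====
-- def metrykaGory(S1, S2):
--     vS1 = []
--     vS2 = []
--     S1c = 0
--     S2c = 0
--
--     for j in S1:
--             if j == '(':
--                 S1c+=1
--                 vS1.append(S1c)
--             elif j == ')':
--                 S1c-=1
--                 vS1.append(S1c)
--             else:
--                 vS1.append(S1c)
--
--     for j in S2:
--             if j == '(':
--                 S2c+=1
--                 vS2.append(S2c)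
--             elif j == ')':
--                 S2c-=1
--                 vS2.append(S2c)
--             else:
--                 vS2.append(S2c)
--
--     return abs(sum(vS1)-sum(vS2))
-- ===== SOURCE B (Python) =====
-- def _contrib(S):
--     n = len(S)
--     total = 0
--     for i, ch in enumerate(S):
--         total += (1 if ch == '(' else -1 if ch == ')' else 0) * (n - i)
--     return total
--
-- def metrykaGory(S1, S2):
--     return abs(_contrib(S1) - _contrib(S2))
-- ===== Notes on version B (the rewrite author's own statement) =====
-- stated objective: alternative
-- what changed: Replaces the two running-height loops that build and then sum whole lists with a single helper computing a weighted sum over enumerate(S): each character's delta (+1/-1/0) times its remaining length len(S)-i; no running height is kept and no list is built.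
import Mathlib
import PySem

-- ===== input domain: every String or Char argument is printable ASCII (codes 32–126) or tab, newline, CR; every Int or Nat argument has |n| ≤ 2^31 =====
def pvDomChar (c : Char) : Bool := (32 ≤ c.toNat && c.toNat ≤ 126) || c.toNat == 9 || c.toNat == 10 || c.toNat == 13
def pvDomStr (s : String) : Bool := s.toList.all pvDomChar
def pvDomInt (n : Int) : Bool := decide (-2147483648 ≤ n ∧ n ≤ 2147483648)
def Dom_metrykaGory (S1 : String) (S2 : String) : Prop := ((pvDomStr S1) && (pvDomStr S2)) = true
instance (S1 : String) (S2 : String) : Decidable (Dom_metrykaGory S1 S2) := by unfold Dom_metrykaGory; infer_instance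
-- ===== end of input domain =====

-- B replaces the two running-height loops (which build lists and sum them) by one
-- weighted single pass: delta(ch) * (len - i) summed over enumerate(S); alternative decomposition, same cost.

-- ===== PORT A =====
-- one loop iteration of A: state = (vS so far, counter)
def pvAStep (st : List Int × Int) (j : Char) : List Int × Int :=
  if j = '(' then (st.1 ++ [st.2 + 1], st.2 + 1)
  else if j = ')' then (st.1 ++ [st.2 - 1], st.2 - 1)
  else (st.1 ++ [st.2], st.2)

def metrykaGory (S1 : String) (S2 : String) : Int :=
  let r1 := S1.toList.foldl pvAStep ([], 0)
  let r2 := S2.toList.foldl pvAStep ([], 0)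
  |r1.1.sum - r2.1.sum|

-- ===== PORT B =====
def pvDelta (c : Char) : Int := if c = '(' then 1 else if c = ')' then -1 else 0

-- Source B's _contrib: one pass over enumerate(S), weight = len(S) - i
def pvContrib (S : String) : Int :=
  let n : Int := (S.toList.length : Int)
  (PySem.List.enumerate S.toList 0).foldl (fun total p => total + pvDelta p.2 * (n - p.1)) 0

def metrykaGory_alt (S1 : String) (S2 : String) : Int :=
  |pvContrib S1 - pvContrib S2|

-- ===== PRECONDITION & SPEC =====
def Spec_metrykaGory (S1 : String) (S2 : String) (out : Int) : Prop := out = metrykaGory_alt S1 S2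
instance (S1 : String) (S2 : String) (out : Int) : Decidable (Spec_metrykaGory S1 S2 out) := by unfold Spec_metrykaGory; infer_instance

-- ===== CLAIM (what is proved, stated in full; the proofs are below) =====
def Claim_equal_metrykaGory : Prop := ∀ (S1 : String) (S2 : String), Dom_metrykaGory S1 S2 → Spec_metrykaGory S1 S2 (metrykaGory S1 S2)

-- ===== LEMMAS AND PROOFS =====

-- sum of the running heights of l starting from counter s
def pvH : List Char → Int → Int
  | [], _ => 0
  | c :: t, s => (s + pvDelta c) + pvH t (s + pvDelta c)

-- the weighted sum of B's pass, with total length n and current index k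
def pvW : List Char → Int → Int → Int
  | [], _, _ => 0
  | c :: t, n, k => pvDelta c * (n - k) + pvW t n (k + 1)

theorem pvA_sum (l : List Char) : ∀ (acc : List Int) (s : Int),
    (l.foldl pvAStep (acc, s)).1.sum = acc.sum + pvH l s := by
  induction l with
  | nil => intro acc s; simp [pvH]
  | cons c t ih =>
    intro acc s
    simp only [List.foldl_cons, pvAStep, pvH]
    split_ifs with h1 h2
    · rw [ih]; simp [pvDelta, h1, List.sum_append]; ring
    · rw [ih]; simp [pvDelta, h1, h2, List.sum_append]; ring
    · rw [ih]; simp [pvDelta, h1, h2, List.sum_append]; ring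

theorem pvH_shift (l : List Char) : ∀ s : Int, pvH l s = s * l.length + pvH l 0 := by
  induction l with
  | nil => intro s; simp [pvH]
  | cons c t ih =>
    intro s
    simp only [pvH, List.length_cons]
    rw [ih (s + pvDelta c), ih (0 + pvDelta c)]
    push_cast
    ring

theorem pvW_eq_pvH (l : List Char) : ∀ k : Int, pvW l (k + l.length) k = pvH l 0 := by
  induction l with
  | nil => intro k; simp [pvW, pvH]
  | cons c t ih =>
    intro k
    simp only [pvW, pvH, List.length_cons]
    have h := ih (k + 1)
    have h2 : k + 1 + (t.length : Int) = k + ((t.length : Int) + 1) := by ring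
    rw [h2] at h
    push_cast
    rw [h, pvH_shift t (0 + pvDelta c)]
    ring

theorem pvB_fold (l : List Char) (n : Int) : ∀ (k total : Int),
    (PySem.List.enumerate l k).foldl (fun total p => total + pvDelta p.2 * (n - p.1)) total
      = total + pvW l n k := by
  induction l with
  | nil => intro k total; simp [PySem.List.enumerate_nil, pvW]
  | cons c t ih =>
    intro k total
    rw [PySem.List.enumerate_cons]
    simp only [List.foldl_cons, pvW]
    rw [ih (k + 1) (total + pvDelta c * (n - k))]
    ring

theorem pvContrib_eq (S : String) : pvContrib S = pvH S.toList 0 := by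
  unfold pvContrib
  rw [pvB_fold S.toList (S.toList.length : Int) 0 0]
  have := pvW_eq_pvH S.toList 0
  simp only [zero_add] at this
  omega

-- ===== VERDICT (by name: the statement is the Claim_ definition above) =====
theorem metrykaGory_spec : Claim_equal_metrykaGory := by
  intro S1 S2 _
  simp only [Spec_metrykaGory, metrykaGory, metrykaGory_alt, pvContrib_eq,
    pvA_sum, List.sum_nil, zero_add]
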